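-- pv_equiv track=rewrite | github.com/johnlspouge/Time-Homogeneity_of_Infection | 5_llr_test/Executable/jls_animal_format.py | _to_columns
-- ===== SOURCE A (Python) =====
-- def _to_columns( survivors ):
--     columns = []
--     npt0 = None
--     for npt in survivors:
--         if npt0 is None:
--             npt0 = npt
--             continue
--         columns.append( [npt0, npt0 - npt] )
--         npt0 = npt
--     return columns
-- ===== SOURCE B (Python) =====
-- def _to_columns(survivors):
--     s = list(survivors)
--     out = []
--     i = len(s) - 1
--     while i >= 1:
--         out.append([s[i - 1], s[i - 1] - s[i]])
--         i -= 1
--     out.reverse()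
--     return out
-- ===== Notes on version B (the rewrite author's own statement) =====
-- stated objective: alternative
-- what changed: Traverses the materialized list back-to-front by index, appending each [prev, prev-next] column in reverse and flipping the result once at the end, instead of A's forward None-sentinel skip-first state machine.
import Mathlib
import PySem

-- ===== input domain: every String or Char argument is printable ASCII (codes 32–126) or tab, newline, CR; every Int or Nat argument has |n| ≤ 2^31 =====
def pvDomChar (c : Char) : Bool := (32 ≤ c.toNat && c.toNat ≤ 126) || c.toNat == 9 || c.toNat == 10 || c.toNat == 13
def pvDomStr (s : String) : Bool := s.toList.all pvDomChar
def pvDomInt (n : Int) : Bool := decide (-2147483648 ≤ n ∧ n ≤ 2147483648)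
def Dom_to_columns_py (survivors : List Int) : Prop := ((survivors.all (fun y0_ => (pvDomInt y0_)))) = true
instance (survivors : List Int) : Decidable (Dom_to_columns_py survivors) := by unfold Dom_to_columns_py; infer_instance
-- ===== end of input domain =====

-- B traverses the list back-to-front by index, building the columns in reverse and flipping once at the end, instead of A's forward None-sentinel skip-first loop (alternative; same cost).


-- ===== PORT A =====
-- Literal port of A: forward foldl carrying (columns, npt0 : Option Int).
def to_columns_py (survivors : List Int) : List (List Int) :=
  (survivors.foldl
    (fun (st : List (List Int) × Option Int) npt =>
      match st.2 with
      | none => (st.1, some npt)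
      | some npt0 => (st.1 ++ [[npt0, npt0 - npt]], some npt))
    ([], none)).1

-- ===== PORT B =====
-- Port of B's while loop: index i counts down from len-1 to 1, rows collected in
-- reverse order; B's s[i-1]/s[i] are always in range, so getD's default is never used.
def altRows (s : List Int) : Nat → List (List Int)
  | 0 => []
  | j + 1 => [s.getD j 0, s.getD j 0 - s.getD (j + 1) 0] :: altRows s j

def to_columns_py_alt (survivors : List Int) : List (List Int) :=
  (altRows survivors (survivors.length - 1)).reverse

-- ===== PRECONDITION & SPEC =====
def Spec_to_columns_py (survivors : List Int) (out : List (List Int)) : Prop := out = to_columns_py_alt survivors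
instance (survivors : List Int) (out : List (List Int)) : Decidable (Spec_to_columns_py survivors out) := by unfold Spec_to_columns_py; infer_instance

-- ===== CLAIM (what is proved, stated in full; the proofs are below) =====
def Claim_equal_to_columns_py : Prop := ∀ (survivors : List Int), Dom_to_columns_py survivors → Spec_to_columns_py survivors (to_columns_py survivors)

-- ===== LEMMAS AND PROOFS =====

-- A's foldl, once the first element has been absorbed, is the pairwise zip-map.
theorem to_columns_aux (l : List Int) : ∀ (acc : List (List Int)) (a : Int),
    (l.foldl
      (fun (st : List (List Int) × Option Int) npt =>
        match st.2 with
        | none => (st.1, some npt)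
        | some npt0 => (st.1 ++ [[npt0, npt0 - npt]], some npt))
      (acc, some a)).1
    = acc ++ ((a :: l).zip l).map (fun p => [p.1, p.1 - p.2]) := by
  induction l with
  | nil => simp
  | cons b t ih =>
    intro acc a
    simp [List.foldl_cons, ih]

-- B's reversed row stack of depth k is the first k entries of the pairwise zip-map.
theorem altRows_reverse (s : List Int) : ∀ (k : Nat),
    k ≤ ((s.zip s.tail).map (fun p => [p.1, p.1 - p.2])).length →
    (altRows s k).reverse = ((s.zip s.tail).map (fun p => [p.1, p.1 - p.2])).take k := by
  intro k
  induction k with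
  | zero => simp [altRows]
  | succ j ih =>
    intro hk
    have hj : j < ((s.zip s.tail).map (fun p => [p.1, p.1 - p.2])).length := hk
    have hlen : j + 1 < s.length := by
      simp [List.length_zip, List.length_tail] at hj
      omega
    rw [altRows, List.reverse_cons, ih (Nat.le_of_lt hj),
        List.take_add_one, List.getElem?_eq_getElem hj]
    have hj' : j < s.length := by omega
    have hjt : j < s.tail.length := by simp [List.length_tail]; omega
    simp [List.getElem_zip, List.getElem_tail, List.getD,
          List.getElem?_eq_getElem hj', List.getElem?_eq_getElem hlen]

-- ===== VERDICT (by name: the statement is the Claim_ definition above) =====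
theorem to_columns_py_spec : Claim_equal_to_columns_py := by
  intro survivors _
  unfold Spec_to_columns_py to_columns_py to_columns_py_alt
  have hB := altRows_reverse survivors (survivors.length - 1)
    (by simp [List.length_zip, List.length_tail])
  cases survivors with
  | nil => simp [altRows]
  | cons a t =>
    rw [List.foldl_cons]
    simp only [to_columns_aux, List.nil_append]
    rw [hB]
    simp [List.length_zip]
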